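-- pv_equiv track=rewrite | github.com/jiangzf93/od-solution-python | C_84_substr/solution.py | solve
-- ===== SOURCE A (Python) =====
-- def solve(inputStr):
--     subStr, mainStr = inputStr.split('\n')
--     subLen, mainLen = len(subStr), len(mainStr)
--     subPos, mainPos = 0, 0
--     while subPos < subLen and mainPos < mainLen:
--         if subStr[subPos] == mainStr[mainPos]:
--             subPos += 1
--         mainPos += 1
--     return (mainPos - 1) if subPos == subLen else -1
-- ===== SOURCE B (Python) =====
-- def solve(inputStr):
--     subStr, mainStr = inputStr.split('\n')
--     positions = {}
--     for i, ch in enumerate(mainStr):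
--         positions.setdefault(ch, []).append(i)
--     pos = -1
--     for ch in subStr:
--         nxt = next((i for i in positions.get(ch, []) if i > pos), -1)
--         if nxt == -1:
--             return -1
--         pos = nxt
--     return pos
-- ===== Notes on version B (the rewrite author's own statement) =====
-- stated objective: alternative
-- what changed: Instead of A's two-pointer sweep over the main string, B first builds an index dict mapping each character to its sorted list of positions in the main string, then matches each substring character by taking the first indexed position beyond the current one; same result, a different data structure and traversal.
import Mathlib
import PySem

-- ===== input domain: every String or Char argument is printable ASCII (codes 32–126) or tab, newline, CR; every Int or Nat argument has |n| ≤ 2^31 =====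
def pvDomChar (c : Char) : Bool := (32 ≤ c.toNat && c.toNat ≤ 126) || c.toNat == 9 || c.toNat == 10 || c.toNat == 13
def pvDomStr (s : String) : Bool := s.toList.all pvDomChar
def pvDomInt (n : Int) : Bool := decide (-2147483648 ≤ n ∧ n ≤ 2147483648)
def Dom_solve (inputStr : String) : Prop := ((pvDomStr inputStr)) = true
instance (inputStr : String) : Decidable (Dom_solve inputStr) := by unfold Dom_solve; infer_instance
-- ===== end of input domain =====

-- B replaces A's two-pointer sweep by a positions index (dict char -> list of indices in the
-- main string) built once, with each substring character matched to the first indexed position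
-- beyond the current one; alternative data structure, same result.

-- ===== PORT A =====
-- the while loop: recursion over both strings as lists, mainPos carried along
def solveLoopA : List Char → List Char → Nat → Int
  | [], _, mainPos => (mainPos : Int) - 1          -- subPos == subLen: return mainPos - 1
  | _ :: _, [], _ => -1                            -- main exhausted first: return -1
  | s :: ss, c :: ms, mainPos =>
      if s == c then solveLoopA ss ms (mainPos + 1)
      else solveLoopA (s :: ss) ms (mainPos + 1)

def solve (inputStr : String) : Int :=
  match PySem.Str.split? inputStr "\n" with
  | some [subStr, mainStr] => solveLoopA subStr.toList mainStr.toList 0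
  | _ => -1                                        -- unpacking raises ValueError; excluded by Pre_solve

-- ===== PORT B =====
-- for ch in subStr: nxt = next((i for i in positions.get(ch, []) if i > pos), -1); …
def solveLoopB : List Char → PySem.Dict Char (List Int) → Int → Int
  | [], _, pos => pos
  | ch :: rest, d, pos =>
      let nxt := ((d.getD ch []).find? (fun i => decide (pos < i))).getD (-1)
      if nxt == -1 then -1 else solveLoopB rest d nxt

def solve_alt (inputStr : String) : Int :=
  (PySem.Str.split? inputStr "\n").elim (-1) fun parts =>
    if parts.length = 2 then
      -- positions.setdefault(ch, []).append(i)  ==  modify ch [] (· ++ [i])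
      let positions := (PySem.List.enumerate (parts.getD 1 "").toList 0).foldl
        (fun d p => d.modify p.2 [] (· ++ [p.1])) PySem.Dict.empty
      solveLoopB (parts.getD 0 "").toList positions (-1)
    else -1                                        -- unpacking raises ValueError; excluded by Pre_solve

-- ===== PRECONDITION & SPEC =====
-- Pre_ excludes exactly the malformed inputs whose split at the newline separator does not yield two parts (zero or several separators); there both Pythons raise ValueError.
def Pre_solve (inputStr : String) : Prop := PySem.Str.count inputStr "\n" = 1
instance (inputStr : String) : Decidable (Pre_solve inputStr) := by unfold Pre_solve; infer_instance
def pvWitness_solve : String := "ab\ncacb"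

def Spec_solve (inputStr : String) (out : Int) : Prop := out = solve_alt inputStr
instance (inputStr : String) (out : Int) : Decidable (Spec_solve inputStr out) := by unfold Spec_solve; infer_instance

-- ===== CLAIM (what is proved, stated in full; the proofs are below) =====
def Claim_equal_solve : Prop := ∀ (inputStr : String), Dom_solve inputStr → Pre_solve inputStr → Spec_solve inputStr (solve inputStr)

-- ===== LEMMAS AND PROOFS =====

-- the list of indices (offset by s) at which ch occurs in a character list
def occList (ch : Char) : List Char → Int → List Int
  | [], _ => []
  | c :: ms, s => (if c = ch then [s] else []) ++ occList ch ms (s + 1)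

-- the dict built by B's first loop looks up to exactly the occurrence lists
lemma occ_dict_aux (ch : Char) : ∀ (ms : List Char) (s : Int),
    (((PySem.List.enumerate ms s).map (fun p => (p.2, p.1))).filter
        (fun p => p.1 == ch)).map (·.2) = occList ch ms s := by
  intro ms
  induction ms with
  | nil => intro s; simp [PySem.List.enumerate_nil, occList]
  | cons c t ih =>
      intro s
      rw [PySem.List.enumerate_cons]
      by_cases h : c = ch
      · subst h
        simp [occList, ih]
      · simp [occList, h, ih]

lemma occ_dict (ch : Char) (ms : List Char) :
    ((PySem.List.enumerate ms 0).foldl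
        (fun d p => d.modify p.2 [] (· ++ [p.1])) PySem.Dict.empty).getD ch []
      = occList ch ms 0 := by
  have hfm : (PySem.List.enumerate ms 0).foldl
        (fun d p => d.modify p.2 [] (· ++ [p.1])) PySem.Dict.empty
      = ((PySem.List.enumerate ms 0).map (fun p => (p.2, p.1))).foldl
        (fun d p => d.modify p.1 [] (· ++ [p.2])) PySem.Dict.empty := by
    rw [List.foldl_map]
  rw [hfm, PySem.Dict.getD_foldl_modify_append, ← occ_dict_aux ch ms 0]
  simp

-- bounds on occurrence indices
lemma occList_mem_bounds (ch : Char) : ∀ (ms : List Char) (s : Int),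
    ∀ x ∈ occList ch ms s, s ≤ x ∧ x < s + ms.length := by
  intro ms
  induction ms with
  | nil => intro s x hx; simp [occList] at hx
  | cons c t ih =>
      intro s x hx
      simp only [occList, List.mem_append] at hx
      rcases hx with hx | hx
      · split_ifs at hx with h
        · simp at hx; subst hx
          have hlen : ((c :: t).length : Int) = (t.length : Int) + 1 := by simp
          constructor <;> omega
        · simp at hx
      · have h2 := ih (s + 1) x hx
        have hlen : ((c :: t).length : Int) = (t.length : Int) + 1 := by simp
        constructor <;> omega

-- splitting the occurrence list at position k
lemma occList_split (ch : Char) : ∀ (k : Nat) (ms : List Char) (s : Int),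
    occList ch ms s = occList ch (ms.take k) s ++ occList ch (ms.drop k) (s + k) := by
  intro k
  induction k with
  | zero => intro ms s; simp [occList]
  | succ k ih =>
      intro ms s
      cases ms with
      | nil => simp [occList]
      | cons c t =>
          simp only [List.take_succ_cons, List.drop_succ_cons, occList]
          rw [ih t (s + 1)]
          have : s + 1 + (k : Int) = s + ((k + 1 : Nat) : Int) := by push_cast; ring
          rw [this, List.append_assoc]

-- find? over the full occurrence list with threshold k-1 = head of the suffix occurrence list
lemma firstGt_occ (ch : Char) (main : List Char) (k : Nat) :
    (((occList ch main 0).find? (fun i => decide ((k : Int) - 1 < i))).getD (-1))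
      = ((occList ch (main.drop k) (k : Int)).head?).getD (-1) := by
  rw [occList_split ch k main 0]
  rw [List.find?_append]
  have h1 : (occList ch (main.take k) 0).find? (fun i => decide ((k : Int) - 1 < i)) = none := by
    rw [List.find?_eq_none]
    intro x hx
    have hb := occList_mem_bounds ch (main.take k) 0 x hx
    have hlen : (main.take k).length ≤ k := by simp
    simp only [decide_eq_true_eq]
    omega
  rw [h1]
  have h0 : (0 : Int) + (k : Nat) = (k : Int) := by omega
  rw [h0]
  cases hocc : occList ch (main.drop k) (k : Int) with
  | nil => simp
  | cons a t =>
      have ha : a ∈ occList ch (main.drop k) (k : Int) := by rw [hocc]; exact List.mem_cons_self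
      have := occList_mem_bounds ch (main.drop k) (k : Int) a ha
      have hp : decide ((k : Int) - 1 < a) = true := by simp; omega
      simp only [List.find?_cons, hp]
      simp

-- the main loop invariant: A's sweep over main's suffix from index k equals B's loop with pos = k - 1
lemma loop_eq (main : List Char) (n : Nat)
    (d : PySem.Dict Char (List Int)) (hd : ∀ ch, d.getD ch [] = occList ch main 0) :
    ∀ (sub : List Char) (k : Nat),
    k ≤ main.length → main.length - k = n →
    solveLoopA sub (main.drop k) k = solveLoopB sub d ((k : Int) - 1) := by
  induction n with
  | zero =>
      intro sub k hk hn
      have hk' : k = main.length := by omega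
      cases sub with
      | nil => simp [solveLoopA, solveLoopB]
      | cons s ss =>
          have hdrop : main.drop k = [] := by simp [hk']
          have hnxt : ((d.getD s []).find? (fun i => decide ((k : Int) - 1 < i))).getD (-1) = -1 := by
            rw [hd s, firstGt_occ, hdrop]; simp [occList]
          rw [hdrop]
          have hB : solveLoopB (s :: ss) d ((k : Int) - 1) = -1 := by
            show (let nxt := ((d.getD s []).find? (fun i => decide ((k : Int) - 1 < i))).getD (-1);
                  if nxt == -1 then -1 else solveLoopB ss d nxt) = -1
            rw [hnxt]; simp
          rw [hB]; rfl
  | succ n ih =>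
      intro sub k hk hn
      have hk' : k < main.length := by omega
      cases sub with
      | nil => simp [solveLoopA, solveLoopB]
      | cons s ss =>
          obtain ⟨c, ms, hdrop⟩ : ∃ c ms, main.drop k = c :: ms := by
            cases h : main.drop k with
            | nil => exfalso; have := List.length_drop (l := main) (i := k); rw [h] at this; simp at this; omega
            | cons c ms => exact ⟨c, ms, rfl⟩
          have hdrop1 : main.drop (k + 1) = ms := by
            rw [← List.tail_drop, hdrop]; rfl
          by_cases hsc : s = c
          · -- match at index k: B's lookup yields exactly k
            have hocc : occList s (main.drop k) (k : Int) = (k : Int) :: occList s ms ((k : Int) + 1) := by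
              rw [hdrop]
              simp [occList, (hsc.symm : c = s)]
            have hnxt : ((d.getD s []).find? (fun i => decide ((k : Int) - 1 < i))).getD (-1) = (k : Int) := by
              rw [hd s, firstGt_occ, hocc]; rfl
            have hA : solveLoopA (s :: ss) (main.drop k) k = solveLoopA ss (main.drop (k + 1)) (k + 1) := by
              rw [hdrop, hdrop1]; simp [solveLoopA, hsc]
            have hkne : ((k : Int) == -1) = false := by simp
            have hB : solveLoopB (s :: ss) d ((k : Int) - 1) = solveLoopB ss d ((k : Int)) := by
              show (let nxt := ((d.getD s []).find? (fun i => decide ((k : Int) - 1 < i))).getD (-1);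
                    if nxt == -1 then -1 else solveLoopB ss d nxt) = _
              rw [hnxt]
              simp [hkne]
            rw [hA, hB]
            have hc : ((k : Int)) = (((k + 1 : Nat) : Int) - 1) := by push_cast; ring
            rw [hc]
            exact ih ss (k + 1) (by omega) (by omega)
          · -- mismatch at index k: the suffix occurrence lists at k and k+1 coincide
            have hocc : occList s (main.drop k) (k : Int) = occList s (main.drop (k + 1)) ((k + 1 : Nat) : Int) := by
              rw [hdrop, hdrop1]
              have : c ≠ s := fun h => hsc h.symm
              simp [occList, this]
            have hnxt : ((d.getD s []).find? (fun i => decide ((k : Int) - 1 < i))).getD (-1)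
                = ((d.getD s []).find? (fun i => decide (((k + 1 : Nat) : Int) - 1 < i))).getD (-1) := by
              rw [hd s, firstGt_occ, firstGt_occ, hocc]
            have hA : solveLoopA (s :: ss) (main.drop k) k = solveLoopA (s :: ss) (main.drop (k + 1)) (k + 1) := by
              rw [hdrop, hdrop1]; simp [solveLoopA, hsc]
            have hB : solveLoopB (s :: ss) d ((k : Int) - 1)
                = solveLoopB (s :: ss) d (((k + 1 : Nat) : Int) - 1) := by
              show (let nxt := ((d.getD s []).find? (fun i => decide ((k : Int) - 1 < i))).getD (-1);
                    if nxt == -1 then -1 else solveLoopB ss d nxt)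
                  = (let nxt := ((d.getD s []).find? (fun i => decide (((k + 1 : Nat) : Int) - 1 < i))).getD (-1);
                    if nxt == -1 then -1 else solveLoopB ss d nxt)
              rw [hnxt]
            rw [hA, hB]
            exact ih (s :: ss) (k + 1) (by omega) (by omega)

lemma loops_agree (sub mainStr : String) :
    solveLoopA sub.toList mainStr.toList 0
      = solveLoopB sub.toList
          ((PySem.List.enumerate mainStr.toList 0).foldl
            (fun d p => d.modify p.2 [] (· ++ [p.1])) PySem.Dict.empty) (-1) := by
  have h := loop_eq mainStr.toList (mainStr.toList.length)
      ((PySem.List.enumerate mainStr.toList 0).foldl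
        (fun d p => d.modify p.2 [] (· ++ [p.1])) PySem.Dict.empty)
      (fun ch => occ_dict ch mainStr.toList)
      sub.toList 0 (by omega) (by omega)
  simpa using h

-- ===== VERDICT (by name: the statement is the Claim_ definition above) =====
theorem solve_spec : Claim_equal_solve := by
  intro inputStr _ _
  show solve inputStr = solve_alt inputStr
  unfold solve solve_alt
  cases h : PySem.Str.split? inputStr "\n" with
  | none => rfl
  | some parts =>
      match parts with
      | [] => rfl
      | [_] => rfl
      | [a, b] => simpa using loops_agree a b
      | x :: y :: z :: rest => simp [Option.elim]
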